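-- pv_equiv track=rewrite | github.com/changediyasunny/assignments | a1/searcher.py | count_doc_frequencies
-- ===== SOURCE A (Python) =====
-- from collections import defaultdict
--
-- def count_doc_frequencies(docs):
--     """ Return a dict mapping terms to document frequency.
--     >>> res = Index().count_doc_frequencies([['a', 'b', 'a'], ['a', 'b', 'c'], ['a']])
--     >>> res['a']
--     3
--     >>> res['b']
--     2
--     >>> res['c']
--     1
--     """
--     freq_dict = defaultdict(list)
--
--     for i, token_list in enumerate(docs):
--
--     	temp_dict = defaultdict(list)
--
--     	for tok in token_list:
--     		if tok not in temp_dict: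
--     			temp_dict[tok] = 1
--
--     	for word in temp_dict:
--     		if word in freq_dict:
--     			freq_dict[word] = freq_dict[word]+1
--     		else:
--     			freq_dict[word] = 1
--
--     return(freq_dict)
-- ===== SOURCE B (Python) =====
-- from collections import defaultdict
--
-- def count_doc_frequencies(docs):
--     # One pass builds an inverted index: term -> set of doc ids; the
--     # document frequency of a term is then just the size of its postings set.
--     postings = defaultdict(set)
--     for i, doc in enumerate(docs):
--         for tok in doc:
--             postings[tok].add(i)
--     result = defaultdict(list)
--     for term, ids in postings.items():
--         result[term] = len(ids)
--     return result
-- ===== Notes on version B (the rewrite author's own statement) =====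
-- stated objective: alternative
-- what changed: Replaces A's per-document temporary dedup dict plus a second conditional counting loop by a one-pass inverted index (term -> set of doc ids) whose set sizes are the document frequencies.
import Mathlib
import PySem

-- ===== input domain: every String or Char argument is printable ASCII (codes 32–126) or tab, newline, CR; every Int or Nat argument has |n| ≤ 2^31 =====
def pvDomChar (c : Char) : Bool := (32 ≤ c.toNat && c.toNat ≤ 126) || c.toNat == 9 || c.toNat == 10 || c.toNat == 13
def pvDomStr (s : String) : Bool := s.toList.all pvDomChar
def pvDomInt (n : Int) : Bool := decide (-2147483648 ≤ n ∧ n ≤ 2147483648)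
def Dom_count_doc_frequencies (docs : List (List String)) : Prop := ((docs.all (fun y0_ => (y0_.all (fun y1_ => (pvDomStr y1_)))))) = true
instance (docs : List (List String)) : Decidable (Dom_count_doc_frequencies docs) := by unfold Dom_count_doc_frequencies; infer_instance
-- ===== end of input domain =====

-- B replaces A's per-document dedup dict + conditional counting loop by a one-pass
-- inverted index (term -> set of doc ids) whose set sizes are the frequencies
-- (alternative decomposition, same cost; return value only — both return fresh dicts).


-- ===== PORT A =====
-- Literal port of A: per document build temp_dict of first-seen tokens, then bump
-- freq_dict for each temp key; return the dict as its items list.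
def count_doc_frequencies (docs : List (List String)) : List (String × Int) :=
  let freq := docs.foldl (fun freq token_list =>
    let temp := token_list.foldl
      (fun t tok => if t.contains tok then t else t.insert tok (1 : Int))
      PySem.Dict.empty
    temp.keys.foldl
      (fun f w => if f.contains w then f.insert w (f.getD w 0 + 1) else f.insert w 1)
      freq) PySem.Dict.empty
  freq.items

-- ===== PORT B =====
-- Literal port of B: inverted index term -> set of doc ids, then map set sizes.
def count_doc_frequencies_alt (docs : List (List String)) : List (String × Int) :=
  let postings := (PySem.List.enumerate docs).foldl (fun d p =>
    p.2.foldl (fun d tok => d.modify tok [] (fun s => PySem.Set.add s p.1)) d)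
    PySem.Dict.empty
  postings.items.map (fun q => (q.1, PySem.Set.len q.2))

-- ===== PRECONDITION & SPEC =====
def Spec_count_doc_frequencies (docs : List (List String)) (out : List (String × Int)) : Prop := out = count_doc_frequencies_alt docs
instance (docs : List (List String)) (out : List (String × Int)) : Decidable (Spec_count_doc_frequencies docs out) := by unfold Spec_count_doc_frequencies; infer_instance

-- ===== CLAIM (what is proved, stated in full; the proofs are below) =====
def Claim_equal_count_doc_frequencies : Prop := ∀ (docs : List (List String)), Dom_count_doc_frequencies docs → Spec_count_doc_frequencies docs (count_doc_frequencies docs)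

-- ===== LEMMAS AND PROOFS =====

-- a single insert adds the key to the key set
theorem keys_insert (d : PySem.Dict String Int) (k : String) (v : Int) :
    (d.insert k v).keys = PySem.Set.add d.keys k := by
  have h := PySem.Dict.keys_foldl_insert [k] (fun _ _ => v) d
  simpa [PySem.Set.update] using h

-- A's temp_dict loop: keys accumulate as a set update
theorem tempA_keys (doc : List String) (t : PySem.Dict String Int) :
    (doc.foldl (fun t tok => if t.contains tok then t else t.insert tok (1 : Int)) t).keys
      = PySem.Set.update t.keys doc := by
  induction doc generalizing t with
  | nil => rfl
  | cons tok rest ih =>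
    by_cases h : t.contains tok
    · have hm : tok ∈ t.keys := (PySem.Dict.contains_iff_mem_keys t tok).mp h
      simp only [List.foldl_cons, h, if_true, PySem.Set.update, List.foldl_cons,
        PySem.Set.add_of_mem hm]
      simpa [PySem.Set.update] using ih t
    · simp only [List.foldl_cons, h, PySem.Set.update, List.foldl_cons]
      simpa [PySem.Set.update, keys_insert] using ih (t.insert tok 1)

-- A's freq-update loop, value side
theorem stepA_getD (ws : List String) (f : PySem.Dict String Int) (t : String) :
    ((ws.foldl (fun f w => if f.contains w then f.insert w (f.getD w 0 + 1) else f.insert w 1) f)).getD t 0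
      = f.getD t 0 + ws.count t := by
  induction ws generalizing f with
  | nil => simp
  | cons w rest ih =>
    have hstep : (if f.contains w then f.insert w (f.getD w 0 + 1) else f.insert w 1)
        = f.insert w (f.getD w 0 + 1) := by
      by_cases h : f.contains w
      · simp [h]
      · have h' : f.contains w = false := by simpa using h
        simp [h, PySem.Dict.getD_of_not_contains f 0 h']
    by_cases ht : t = w
    · subst ht
      simp [hstep, ih, PySem.Dict.getD_insert_self]
      ring
    · simp [hstep, ih, PySem.Dict.getD_insert_of_ne _ _ _ ht,
        (by simpa [eq_comm] using ht : ¬ w = t)]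

-- A's freq-update loop, key side
theorem stepA_keys (ws : List String) (f : PySem.Dict String Int) :
    ((ws.foldl (fun f w => if f.contains w then f.insert w (f.getD w 0 + 1) else f.insert w 1) f)).keys
      = PySem.Set.update f.keys ws := by
  have hfun : (fun (f : PySem.Dict String Int) w =>
      if f.contains w then f.insert w (f.getD w 0 + 1) else f.insert w 1)
      = (fun f w => f.insert w (if f.contains w then f.getD w 0 + 1 else 1)) := by
    funext f w; by_cases h : f.contains w <;> simp [h]
  rw [hfun]
  exact PySem.Dict.keys_foldl_insert ws _ f

-- updating by the deduplicated list is updating by the list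
theorem update_ofList (xs : List String) (s : PySem.Set String) :
    PySem.Set.update s (PySem.Set.ofList xs) = PySem.Set.update s xs := by
  induction xs using List.reverseRecOn with
  | nil => rfl
  | append_singleton ys x ih =>
    have hof : PySem.Set.ofList (ys ++ [x]) = PySem.Set.add (PySem.Set.ofList ys) x := by
      simp [PySem.Set.ofList_eq_foldl]
    have hupd : ∀ (u : PySem.Set String) (l : List String) (y : String),
        PySem.Set.update u (l ++ [y]) = PySem.Set.add (PySem.Set.update u l) y := by
      intro u l y; simp [PySem.Set.update]
    by_cases hx : x ∈ ys
    · have : x ∈ PySem.Set.ofList ys := (PySem.Set.mem_ofList ys x).mpr hx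
      rw [hof, PySem.Set.add_of_mem this, ih, hupd]
      have : x ∈ PySem.Set.update s ys := (PySem.Set.mem_update s ys x).mpr (Or.inr hx)
      rw [PySem.Set.add_of_mem this]
    · have hx' : x ∉ PySem.Set.ofList ys := fun h => hx ((PySem.Set.mem_ofList ys x).mp h)
      rw [hof, PySem.Set.add_of_not_mem hx', hupd, ih, hupd]

-- folding Set.update over a list of documents updates by the flattening
theorem foldl_update_flatten (docs : List (List String)) (s : PySem.Set String) :
    docs.foldl (fun ks doc => PySem.Set.update ks doc) s = PySem.Set.update s docs.flatten := by
  induction docs generalizing s with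
  | nil => rfl
  | cons doc rest ih =>
    rw [List.foldl_cons, ih]
    simp [PySem.Set.update, List.foldl_append]

-- A's whole fold, key side
theorem A_keys (docs : List (List String)) (f : PySem.Dict String Int) :
    (docs.foldl (fun freq token_list =>
      (token_list.foldl (fun t tok => if t.contains tok then t else t.insert tok (1 : Int))
        PySem.Dict.empty).keys.foldl
        (fun f w => if f.contains w then f.insert w (f.getD w 0 + 1) else f.insert w 1) freq) f).keys
      = PySem.Set.update f.keys docs.flatten := by
  rw [← foldl_update_flatten]
  induction docs generalizing f with
  | nil => rfl
  | cons doc rest ih =>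
    have h1 : (doc.foldl (fun t tok => if t.contains tok then t else t.insert tok (1 : Int))
        PySem.Dict.empty).keys = PySem.Set.ofList doc := by
      rw [tempA_keys]
      show PySem.Set.update ([] : PySem.Set String) doc = _
      simp [PySem.Set.ofList_eq_foldl, PySem.Set.update]
    rw [List.foldl_cons, ih, stepA_keys, h1, update_ofList]
    rfl

-- A's whole fold, value side
theorem A_getD (docs : List (List String)) (f : PySem.Dict String Int) (t : String) :
    ((docs.foldl (fun freq token_list =>
      (token_list.foldl (fun t tok => if t.contains tok then t else t.insert tok (1 : Int))
        PySem.Dict.empty).keys.foldl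
        (fun f w => if f.contains w then f.insert w (f.getD w 0 + 1) else f.insert w 1) freq) f)).getD t 0
      = f.getD t 0 + (docs.countP (fun doc => decide (t ∈ doc)) : Int) := by
  induction docs generalizing f with
  | nil => simp
  | cons doc rest ih =>
    simp only [List.foldl_cons, ih, stepA_getD]
    have hkeys : (doc.foldl (fun t tok => if t.contains tok then t else t.insert tok (1 : Int))
        PySem.Dict.empty).keys = PySem.Set.ofList doc := by
      rw [tempA_keys]
      show PySem.Set.update ([] : PySem.Set String) doc = _
      simp [PySem.Set.ofList_eq_foldl, PySem.Set.update]
    rw [hkeys]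
    have hcnt : (PySem.Set.ofList doc).count t = if t ∈ doc then 1 else 0 := by
      rw [List.Nodup.count (PySem.Set.nodup_ofList doc)]
      simp [PySem.Set.mem_ofList]
    rw [hcnt, List.countP_cons]
    by_cases h : t ∈ doc <;> simp [h] <;> omega

-- B's inner loop over one document, value side
theorem innerB_getD (doc : List String) (d : PySem.Dict String (List Int)) (i : Int) (t : String) :
    (doc.foldl (fun d tok => d.modify tok [] (fun s => PySem.Set.add s i)) d).getD t []
      = if t ∈ doc then PySem.Set.add (d.getD t []) i else d.getD t [] := by
  induction doc generalizing d with
  | nil => simp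
  | cons tok rest ih =>
    by_cases ht : t = tok
    · subst ht
      simp only [List.foldl_cons, ih, PySem.Dict.getD_modify_self, List.mem_cons, true_or,
        if_true]
      by_cases hr : t ∈ rest
      · simp only [hr, if_true]
        exact PySem.Set.add_of_mem ((PySem.Set.mem_add _ i i).mpr (Or.inr rfl))
      · simp [hr]
    · simp only [List.foldl_cons, ih, PySem.Dict.getD_modify_of_ne _ _ _ ht, List.mem_cons]
      simp [ht]

-- B's outer loop: set sizes count the documents containing the term
theorem outerB_len (docs : List (List String)) (i0 : Int) (d : PySem.Dict String (List Int))
    (hfresh : ∀ t j, j ∈ d.getD t [] → j < i0) (t : String) :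
    (((PySem.List.enumerate docs i0).foldl (fun d p =>
        p.2.foldl (fun d tok => d.modify tok [] (fun s => PySem.Set.add s p.1)) d) d).getD t []).length
      = (d.getD t []).length + docs.countP (fun doc => decide (t ∈ doc)) := by
  induction docs generalizing i0 d with
  | nil => simp [PySem.List.enumerate]
  | cons doc rest ih =>
    have henum : PySem.List.enumerate (doc :: rest) i0 = (i0, doc) :: PySem.List.enumerate rest (i0 + 1) := rfl
    rw [henum]
    simp only [List.foldl_cons]
    set d' := doc.foldl (fun d tok => d.modify tok [] (fun s => PySem.Set.add s i0)) d with hd'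
    have hval : ∀ u, d'.getD u [] = if u ∈ doc then PySem.Set.add (d.getD u []) i0 else d.getD u [] :=
      fun u => innerB_getD doc d i0 u
    have hfresh' : ∀ u j, j ∈ d'.getD u [] → j < i0 + 1 := by
      intro u j hj
      rw [hval u] at hj
      by_cases hu : u ∈ doc
      · rw [if_pos hu] at hj
        rcases (PySem.Set.mem_add _ i0 j).mp hj with h | h
        · exact lt_trans (hfresh u j h) (by omega)
        · omega
      · rw [if_neg hu] at hj
        exact lt_trans (hfresh u j hj) (by omega)
    rw [ih (i0 + 1) d' hfresh', hval t, List.countP_cons]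
    by_cases h : t ∈ doc
    · have hnm : i0 ∉ d.getD t [] := fun hm => absurd (hfresh t i0 hm) (lt_irrefl i0)
      rw [if_pos h, PySem.Set.add_of_not_mem hnm]
      simp [h]
      omega
    · rw [if_neg h]
      simp [h]

-- B's fold, key side
theorem B_keys (docs : List (List String)) (i0 : Int) (d : PySem.Dict String (List Int)) :
    ((PySem.List.enumerate docs i0).foldl (fun d p =>
        p.2.foldl (fun d tok => d.modify tok [] (fun s => PySem.Set.add s p.1)) d) d).keys
      = PySem.Set.update d.keys docs.flatten := by
  induction docs generalizing i0 d with
  | nil => simp [PySem.List.enumerate]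
  | cons doc rest ih =>
    have henum : PySem.List.enumerate (doc :: rest) i0 = (i0, doc) :: PySem.List.enumerate rest (i0 + 1) := rfl
    rw [henum]
    simp only [List.foldl_cons]
    rw [ih (i0 + 1)]
    rw [PySem.Dict.keys_foldl_modify doc [] (fun _ _ => (fun s => PySem.Set.add s i0)) d]
    simp [PySem.Set.update, List.foldl_append]

-- ===== VERDICT (by name: the statement is the Claim_ definition above) =====
theorem count_doc_frequencies_spec : Claim_equal_count_doc_frequencies := by
  intro docs _
  unfold Spec_count_doc_frequencies count_doc_frequencies count_doc_frequencies_alt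
  simp only []
  set freq := docs.foldl (fun freq token_list =>
    (token_list.foldl (fun t tok => if t.contains tok then t else t.insert tok (1 : Int))
      PySem.Dict.empty).keys.foldl
      (fun f w => if f.contains w then f.insert w (f.getD w 0 + 1) else f.insert w 1) freq)
    (PySem.Dict.empty : PySem.Dict String Int) with hfreq
  set postings := (PySem.List.enumerate docs).foldl (fun d p =>
    p.2.foldl (fun d tok => d.modify tok [] (fun s => PySem.Set.add s p.1)) d)
    (PySem.Dict.empty : PySem.Dict String (List Int)) with hpost
  have hKa : freq.keys = PySem.Set.ofList docs.flatten := by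
    rw [hfreq, A_keys]
    show PySem.Set.update ([] : PySem.Set String) docs.flatten = _
    simp [PySem.Set.ofList_eq_foldl, PySem.Set.update]
  have hKb : postings.keys = PySem.Set.ofList docs.flatten := by
    rw [hpost, B_keys]
    show PySem.Set.update ([] : PySem.Set String) docs.flatten = _
    simp [PySem.Set.ofList_eq_foldl, PySem.Set.update]
  have hnd : freq.keys.Nodup := by rw [hKa]; exact PySem.Set.nodup_ofList _
  have hndb : postings.keys.Nodup := by rw [hKb]; exact PySem.Set.nodup_ofList _
  rw [PySem.Dict.items_eq_map_keys freq hnd 0, PySem.Dict.items_eq_map_keys postings hndb []]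
  rw [hKa, hKb, List.map_map]
  apply List.map_congr_left
  intro k _
  have hva : freq.getD k 0 = (docs.countP (fun doc => decide (k ∈ doc)) : Int) := by
    rw [hfreq, A_getD]; simp
  have hvb : (postings.getD k []).length = docs.countP (fun doc => decide (k ∈ doc)) := by
    rw [hpost, outerB_len docs 0 PySem.Dict.empty (by intro t j hj; simp at hj) k]
    simp
  simp [Function.comp, hva, PySem.Set.len, hvb]
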